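-- pv_equiv track=rewrite | github.com/nickaigi/challenges_24 | leetcode/count_tuples.py | countTuples
-- ===== SOURCE A (Python) =====
-- from collections import defaultdict
--
-- def countTuples(nums):
--     # Create a frequency map for all possible products of pairs
--     product_count = defaultdict(int)
--     n = len(nums)
--
--     # Iterate through all unique pairs (a, b) where a != b
--     for i in range(n):
--         for j in range(i + 1, n):
--             product = nums[i] * nums[j]
--             product_count[product] += 1
--
--     # Calculate the total number of valid tuples
--     total = 0
--     for count in product_count.values():
--         if count >= 2:
--             # For each product with at least 2 pairs, calculate the number of valid tuples
--             # Each pair can be arranged in 2 ways (a,b or b,a), and there are count such pairs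
--             # So the total tuples for this product is count * (count - 1) * 4
--             total += count * (count - 1) * 4
--
--     return total
-- ===== SOURCE B (Python) =====
-- def countTuples(nums):
--     # Sort the pair products and count equal runs instead of hashing them:
--     # a run of c equal products contributes 8*(1+2+...+(c-1)) = 4*c*(c-1) tuples.
--     n = len(nums)
--     products = sorted(nums[i] * nums[j] for i in range(n) for j in range(i + 1, n))
--     total = 0
--     run = 1
--     prev = None
--     for p in products:
--         if prev is not None and p == prev:
--             total += 8 * run
--             run += 1
--         else:
--             run = 1
--         prev = p
--     return total
-- ===== Notes on version B (the rewrite author's own statement) =====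
-- stated objective: alternative
-- what changed: B replaces A's hash-counter of pair products and closed-form tally over its values by sort-then-scan: it sorts the list of pair products and accumulates 8*run while scanning equal runs, so no dictionary exists at all.
import Mathlib
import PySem

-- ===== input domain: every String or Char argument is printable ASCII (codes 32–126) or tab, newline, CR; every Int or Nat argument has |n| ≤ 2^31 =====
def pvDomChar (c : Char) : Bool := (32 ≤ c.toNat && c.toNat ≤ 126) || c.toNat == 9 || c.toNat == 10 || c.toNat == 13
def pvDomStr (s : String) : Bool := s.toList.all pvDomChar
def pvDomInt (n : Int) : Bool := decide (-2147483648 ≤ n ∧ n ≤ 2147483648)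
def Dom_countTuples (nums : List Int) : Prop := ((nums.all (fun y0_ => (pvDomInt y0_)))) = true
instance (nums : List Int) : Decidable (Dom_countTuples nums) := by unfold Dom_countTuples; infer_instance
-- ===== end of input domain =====

-- B replaces A's hash counter of pair products and its closed-form tally over the counter's
-- values by sort-then-scan over the sorted product list (objective: alternative algorithm).

-- ===== PORT A =====
def countTuples (nums : List Int) : Int :=
  let n : Int := PySem.List.len nums
  let product_count : PySem.Dict Int Int :=
    (PySem.List.pyRange 0 n 1).foldl (fun d i =>
      (PySem.List.pyRange (i + 1) n 1).foldl (fun d j =>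
        d.modify (PySem.List.pyGetD nums i 0 * PySem.List.pyGetD nums j 0) 0 (· + 1)) d)
      PySem.Dict.empty
  product_count.values.foldl
    (fun total count => if 2 ≤ count then total + count * (count - 1) * 4 else total) 0

-- ===== PORT B =====
def countTuples_alt (nums : List Int) : Int :=
  let n : Int := PySem.List.len nums
  let products : List Int :=
    PySem.List.sorted
      ((PySem.List.pyRange 0 n 1).flatMap (fun i =>
        (PySem.List.pyRange (i + 1) n 1).map
          (fun j => PySem.List.pyGetD nums i 0 * PySem.List.pyGetD nums j 0)))
      (fun x => x) false
  -- the scan loop: state (total, run, prev)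
  let st : Int × Int × Option Int :=
    products.foldl (fun st p =>
      match st.2.2 with
      | some v => if p = v then (st.1 + 8 * st.2.1, st.2.1 + 1, some p)
                  else (st.1, (1 : Int), some p)
      | none => (st.1, (1 : Int), some p)) (0, 1, none)
  st.1

-- ===== PRECONDITION & SPEC =====
def Spec_countTuples (nums : List Int) (out : Int) : Prop := out = countTuples_alt nums
instance (nums : List Int) (out : Int) : Decidable (Spec_countTuples nums out) := by unfold Spec_countTuples; infer_instance

-- ===== CLAIM (what is proved, stated in full; the proofs are below) =====
def Claim_equal_countTuples : Prop := ∀ (nums : List Int), Dom_countTuples nums → Spec_countTuples nums (countTuples nums)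

-- ===== LEMMAS AND PROOFS =====

-- the per-count contribution A's second loop adds
def pvG (c : Int) : Int := if 2 ≤ c then c * (c - 1) * 4 else 0

theorem pvG_eq (n : Nat) : pvG (n : Int) = 4 * (n : Int) * ((n : Int) - 1) := by
  unfold pvG
  split_ifs with h
  · ring
  · have : n = 0 ∨ n = 1 := by omega
    rcases this with h | h <;> simp [h]

-- fold over a flattened double loop
theorem pv_foldl_flatMap {α β γ : Type} (l : List α) (f : α → List β) (g : γ → β → γ)
    (init : γ) : (l.flatMap f).foldl g init = l.foldl (fun acc a => (f a).foldl g acc) init := by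
  induction l generalizing init with
  | nil => rfl
  | cons a t ih => simp [List.flatMap_cons, List.foldl_append, ih]

theorem pv_foldl_if_eq_sum (l : List Int) (t : Int) :
    l.foldl (fun total c => if 2 ≤ c then total + c * (c - 1) * 4 else total) t
      = t + (l.map pvG).sum := by
  induction l generalizing t with
  | nil => simp
  | cons c tl ih =>
      simp only [List.foldl_cons, List.map_cons, List.sum_cons, ih]
      unfold pvG; split_ifs <;> ring

-- A's total as a sum over the distinct products
def pvS (L : List Int) : Int := ((PySem.Set.ofList L).map (fun k => pvG (L.count k : Int))).sum

-- the same sum as a Finset sum (permutation invariant form)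
def pvFS (M : List Int) : Int :=
  ∑ a ∈ M.toFinset, 4 * (M.count a : Int) * ((M.count a : Int) - 1)

theorem pvS_eq_pvFS (L : List Int) : pvS L = pvFS L := by
  unfold pvS pvFS
  have hnd := PySem.Set.nodup_ofList (xs := L)
  have hfin : (PySem.Set.ofList L).toFinset = L.toFinset := by
    ext a
    simp [List.mem_toFinset, PySem.Set.mem_ofList]
  rw [← List.sum_toFinset _ hnd, hfin]
  apply Finset.sum_congr rfl
  intro a _
  exact pvG_eq (L.count a)

theorem pvFS_perm (L M : List Int) (h : L.Perm M) : pvFS L = pvFS M := by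
  unfold pvFS
  rw [List.toFinset_eq_of_perm _ _ h]
  apply Finset.sum_congr rfl
  intro a _
  rw [h.count_eq]

theorem pvFS_cons (p : Int) (M : List Int) :
    pvFS (p :: M) = 4 * ((M.count p : Int) + 1) * (M.count p : Int)
      + pvFS (M.filter (fun x => x ≠ p)) := by
  unfold pvFS
  have hmem : p ∈ (p :: M).toFinset := by simp
  rw [← Finset.add_sum_erase _ _ hmem]
  have h1 : ((p :: M).count p : Int) = (M.count p : Int) + 1 := by
    simp
  have herase : ((p :: M).toFinset).erase p = (M.filter (fun x => x ≠ p)).toFinset := by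
    ext a
    simp only [Finset.mem_erase, List.mem_toFinset, List.mem_cons, List.mem_filter,
      decide_eq_true_eq, ne_eq]
    constructor
    · rintro ⟨hne, h | h⟩
      · exact absurd h hne
      · exact ⟨h, hne⟩
    · rintro ⟨h, hne⟩
      exact ⟨hne, Or.inr h⟩
  rw [herase]
  have : ∀ a ∈ (M.filter (fun x => x ≠ p)).toFinset,
      4 * (((p :: M).count a : Int)) * (((p :: M).count a : Int) - 1)
        = 4 * (((M.filter (fun x => x ≠ p)).count a : Int))
            * (((M.filter (fun x => x ≠ p)).count a : Int) - 1) := by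
    intro a ha
    have hap : a ≠ p := by
      simp only [List.mem_toFinset, List.mem_filter, decide_eq_true_eq] at ha
      exact ha.2
    have hc : (M.filter (fun x => x ≠ p)).count a = M.count a := by
      rw [List.count_filter]
      simp [hap]
    have hc2 : (p :: M).count a = M.count a := by
      simp [Ne.symm hap]
    rw [hc, hc2]
  rw [Finset.sum_congr rfl this, h1]
  ring_nf

-- the scan loop as structural recursion on the remaining sorted list
def pvRun (t r v : Int) : List Int → Int
  | [] => t
  | p :: M => if p = v then pvRun (t + 8 * r) (r + 1) p M else pvRun t 1 p M

theorem pv_foldl_eq_pvRun (M : List Int) (t r v : Int) :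
    (M.foldl (fun (st : Int × Int × Option Int) p =>
      match st.2.2 with
      | some w => if p = w then (st.1 + 8 * st.2.1, st.2.1 + 1, some p)
                  else (st.1, (1 : Int), some p)
      | none => (st.1, (1 : Int), some p)) (t, r, some v)).1 = pvRun t r v M := by
  induction M generalizing t r v with
  | nil => rfl
  | cons p M ih =>
      simp only [List.foldl_cons, pvRun]
      by_cases h : p = v
      · simp [h, ih]
      · simp [h, ih]

-- value of the scan over a sorted tail: run already at r for value v
theorem pvRun_sorted (M : List Int) (hM : M.Pairwise (· ≤ ·)) :
    ∀ v t r : Int, (∀ x ∈ M, v ≤ x) →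
      pvRun t r v M = t + 8 * (M.count v : Int) * r
        + 4 * (M.count v : Int) * ((M.count v : Int) - 1)
        + pvFS (M.filter (fun x => x ≠ v)) := by
  induction M with
  | nil => intro v t r _; simp [pvRun, pvFS]
  | cons p M ih =>
      intro v t r hle
      rcases List.pairwise_cons.mp hM with ⟨hpM, hM'⟩
      by_cases hpv : p = v
      · subst hpv
        have hstep : pvRun t r p (p :: M) = pvRun (t + 8 * r) (r + 1) p M := by
          simp [pvRun]
        rw [hstep, ih hM' p (t + 8 * r) (r + 1) hpM]
        have hc : ((p :: M).count p : Int) = (M.count p : Int) + 1 := by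
          simp
        have hf : (p :: M).filter (fun x => x ≠ p) = M.filter (fun x => x ≠ p) := by
          simp
        rw [hc, hf]
        ring_nf
      · have hvp : v < p := lt_of_le_of_ne (hle p (List.mem_cons_self)) (fun e => hpv e.symm)
        have hvM : ∀ x ∈ p :: M, v < x := by
          intro x hx
          rcases List.mem_cons.mp hx with h | h
          · exact h ▸ hvp
          · exact lt_of_lt_of_le hvp (hpM x h)
        have hcv : (p :: M).count v = 0 := by
          rw [List.count_eq_zero]
          intro hmem
          exact absurd rfl (ne_of_gt (hvM v hmem))
        have hfv : (p :: M).filter (fun x => x ≠ v) = p :: M := by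
          rw [List.filter_eq_self]
          intro x hx
          simp [ne_of_gt (hvM x hx)]
        simp only [pvRun, if_neg hpv]
        rw [ih hM' p t 1 hpM, hcv, hfv, pvFS_cons]
        push_cast
        ring_nf

-- A's second loop computes pvS of the product list
theorem pv_afold (L : List Int) :
    (PySem.Dict.counter L).values.foldl
        (fun total count => if 2 ≤ count then total + count * (count - 1) * 4 else total) 0
      = pvS L := by
  rw [pv_foldl_if_eq_sum,
      PySem.Dict.values_eq_map_keys (PySem.Dict.counter L) (PySem.Dict.nodup_keys_counter L) 0,
      PySem.Dict.keys_counter, List.map_map]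
  unfold pvS
  simp [Function.comp_def, PySem.Dict.getD_counter]

-- B's scan over the sorted product list computes pvFS
theorem pv_bscan (L : List Int) :
    ((PySem.List.sorted L (fun x => x) false).foldl (fun (st : Int × Int × Option Int) p =>
      match st.2.2 with
      | some w => if p = w then (st.1 + 8 * st.2.1, st.2.1 + 1, some p)
                  else (st.1, (1 : Int), some p)
      | none => (st.1, (1 : Int), some p)) (0, 1, none)).1 = pvFS L := by
  have hperm : (PySem.List.sorted L (fun x => x) false).Perm L :=
    PySem.List.sorted_perm L (fun x => x) false
  rw [← pvFS_perm _ L hperm]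
  have hpw : (PySem.List.sorted L (fun x => x) false).Pairwise (· ≤ ·) := by
    have := PySem.List.sorted_pairwise (xs := L) (key := fun x => x)
    simpa using this
  cases hS : PySem.List.sorted L (fun x => x) false with
  | nil => simp [pvFS]
  | cons h T =>
      rw [hS] at hpw
      rcases List.pairwise_cons.mp hpw with ⟨hhT, hT⟩
      simp only [List.foldl_cons]
      rw [pv_foldl_eq_pvRun, pvRun_sorted T hT h 0 1 hhT, pvFS_cons]
      ring_nf

-- ===== VERDICT (by name: the statement is the Claim_ definition above) =====
theorem countTuples_spec : Claim_equal_countTuples := by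
  intro nums _
  unfold Spec_countTuples countTuples countTuples_alt
  set n : Int := PySem.List.len nums with hn
  set L : List Int := (PySem.List.pyRange 0 n 1).flatMap (fun i =>
    (PySem.List.pyRange (i + 1) n 1).map
      (fun j => PySem.List.pyGetD nums i 0 * PySem.List.pyGetD nums j 0)) with hL
  have hA : (PySem.List.pyRange 0 n 1).foldl (fun d i =>
      (PySem.List.pyRange (i + 1) n 1).foldl (fun d j =>
        d.modify (PySem.List.pyGetD nums i 0 * PySem.List.pyGetD nums j 0) 0 (· + 1)) d)
      PySem.Dict.empty = PySem.Dict.counter L := by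
    rw [PySem.Dict.counter_eq_foldl, hL, pv_foldl_flatMap]
    simp [List.foldl_map]
  simp only [hA, pv_afold, pvS_eq_pvFS, pv_bscan]
  rfl
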